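-- pv_equiv track=rewrite | github.com/waylandy/HelperBunny | redux/sequence/alignmentarray.py | aln2array
-- ===== SOURCE A (Python) =====
-- isins = lambda x: x.islower()
--
-- def aln2array(inseq):
--     x, preins = [''], True
--     for now in inseq:
--         nowins = isins(now)
--         if nowins:
--             if preins:
--                 x[-1] += now
--             else:
--                 x += [now]
--         else:
--             if preins:
--                 x += [now]
--             else:
--                 x += ['',now]
--         preins = nowins
--     return x if isins(x[-1][0]) else x+['']
-- ===== SOURCE B (Python) =====
-- from itertools import groupby
--
-- isins = lambda x: x.islower()
--
-- def aln2array(inseq):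
--     x, first = [''], True
--     for ins, grp in groupby(inseq, key=isins):
--         run = list(grp)
--         if ins:
--             if first:
--                 x[-1] += ''.join(run)
--             else:
--                 x.append(''.join(run))
--         else:
--             x.append(run[0])
--             for m in run[1:]:
--                 x += ['', m]
--         first = False
--     return x if isins(x[-1][0]) else x + ['']
-- ===== Notes on version B (the rewrite author's own statement) =====
-- stated objective: alternative
-- what changed: Replaces A's per-character state machine (preins flag updated each char) with a run-level traversal: the input is split into maximal same-case runs and each run is handled as a whole (one join per insert run, first-char/rest expansion per match run).
import Mathlib
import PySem

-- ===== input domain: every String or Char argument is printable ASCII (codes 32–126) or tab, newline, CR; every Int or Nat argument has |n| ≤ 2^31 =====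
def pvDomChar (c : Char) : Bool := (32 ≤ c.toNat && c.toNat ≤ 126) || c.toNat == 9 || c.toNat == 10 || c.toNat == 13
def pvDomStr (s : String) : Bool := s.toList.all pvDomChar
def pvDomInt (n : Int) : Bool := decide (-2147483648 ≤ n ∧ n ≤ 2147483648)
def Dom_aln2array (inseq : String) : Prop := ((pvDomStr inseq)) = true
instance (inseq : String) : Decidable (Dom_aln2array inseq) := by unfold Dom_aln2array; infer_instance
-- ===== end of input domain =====

-- B replaces A's per-character preins state machine by a run-level traversal (split into
-- maximal same-case runs, handle each run as a whole); same O(n) cost, return value only.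

-- ===== PORT A =====
-- isins = lambda x: x.islower()  (on the printable-ASCII domain: exactly 'a'..'z')
def isinsP (c : Char) : Bool := 'a' ≤ c && c ≤ 'z'

-- one iteration of A's for-loop over (x, preins)
def aStep (st : List String × Bool) (now : Char) : List String × Bool :=
  let x := st.1
  let preins := st.2
  let nowins := isinsP now
  if nowins then
    if preins then (x.dropLast ++ [x.getLastD "" ++ now.toString], nowins)
    else (x ++ [now.toString], nowins)
  else
    if preins then (x ++ [now.toString], nowins)
    else (x ++ ["", now.toString], nowins)

def aln2array (inseq : String) : List String :=
  let st := inseq.toList.foldl aStep ([""], true)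
  let x := st.1
  -- x[-1][0]: on Pre_ (inseq ≠ "") the last element is nonempty, so headD is exact there
  if isinsP ((x.getLastD "").toList.headD ' ') then x else x ++ [""]

-- ===== PORT B =====
-- itertools.groupby(inseq, key=isins): maximal runs of equal isins-value
def splitRuns : List Char → List (List Char)
  | [] => []
  | c :: cs =>
    (c :: cs.takeWhile (fun d => isinsP d == isinsP c)) ::
      splitRuns (cs.dropWhile (fun d => isinsP d == isinsP c))
termination_by l => l.length
decreasing_by
  simp only [List.length_cons]
  exact Nat.lt_succ_of_le (List.length_dropWhile_le _ _)

-- one iteration of B's for-loop over runs, state (x, first)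
def bStep (st : List String × Bool) (run : List Char) : List String × Bool :=
  let x := st.1
  let first := st.2
  if isinsP (run.headD ' ') then
    if first then (x.dropLast ++ [x.getLastD "" ++ String.ofList run], false)
    else (x ++ [String.ofList run], false)
  else
    match run with
    | [] => (x, false)   -- unreachable: groupby yields nonempty runs
    | m :: rest => (rest.foldl (fun x m => x ++ ["", m.toString]) (x ++ [m.toString]), false)

def aln2array_alt (inseq : String) : List String :=
  let st := (splitRuns inseq.toList).foldl bStep ([""], true)
  let x := st.1
  if isinsP ((x.getLastD "").toList.headD ' ') then x else x ++ [""]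

-- ===== PRECONDITION & SPEC =====
-- Pre_ excludes only the empty string, on which Python A raises IndexError (x[-1][0] on ['']).
def Pre_aln2array (inseq : String) : Prop := inseq ≠ ""
instance (inseq : String) : Decidable (Pre_aln2array inseq) := by unfold Pre_aln2array; infer_instance
def pvWitness_aln2array : String := "aA"

def Spec_aln2array (inseq : String) (out : List String) : Prop := out = aln2array_alt inseq
instance (inseq : String) (out : List String) : Decidable (Spec_aln2array inseq out) := by unfold Spec_aln2array; infer_instance

-- ===== CLAIM (what is proved, stated in full; the proofs are below) =====
def Claim_equal_aln2array : Prop := ∀ (inseq : String), Dom_aln2array inseq → Pre_aln2array inseq → Spec_aln2array inseq (aln2array inseq)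

-- ===== LEMMAS AND PROOFS =====

-- A over a lowercase run with preins = true merges every char into the last slot
lemma foldA_lower (run : List Char) : ∀ (xs : List String) (s : String),
    (∀ c ∈ run, isinsP c = true) →
    List.foldl aStep (xs ++ [s], true) run = (xs ++ [s ++ String.ofList run], true) := by
  induction run with
  | nil => intro xs s _; simp
  | cons c t ih =>
    intro xs s h
    have hc : isinsP c = true := h c (List.mem_cons_self)
    have : aStep (xs ++ [s], true) c = (xs ++ [s ++ c.toString], true) := by
      simp [aStep, hc]
    rw [List.foldl_cons, this, ih xs (s ++ c.toString) (fun d hd => h d (List.mem_cons_of_mem _ hd))]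
    have : s ++ c.toString ++ String.ofList t = s ++ String.ofList (c :: t) := by
      apply String.ext
      simp [Char.toString]
    rw [this]

-- A over an uppercase run with preins = false appends ['', m] for each char
lemma foldA_upper (run : List Char) : ∀ (x : List String),
    (∀ c ∈ run, isinsP c = false) →
    List.foldl aStep (x, false) run = (x ++ run.flatMap (fun m => ["", m.toString]), false) := by
  induction run with
  | nil => intro x _; simp
  | cons c t ih =>
    intro x h
    have hc : isinsP c = false := h c (List.mem_cons_self)
    have : aStep (x, false) c = (x ++ ["", c.toString], false) := by
      simp [aStep, hc]
    rw [List.foldl_cons, this, ih _ (fun d hd => h d (List.mem_cons_of_mem _ hd))]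
    simp

-- B's inner for-loop over the tail of a match run, as a flatMap
lemma foldB_inner (l : List String) (t : List Char) :
    t.foldl (fun x m => x ++ ["", m.toString]) l = l ++ t.flatMap (fun m => ["", m.toString]) := by
  induction t generalizing l with
  | nil => simp
  | cons c t ih => simp [List.flatMap_def]

-- head of dropWhile fails the predicate
lemma dropWhile_head_false {p : Char → Bool} : ∀ (l : List Char) (c : Char) (t : List Char),
    l.dropWhile p = c :: t → p c = false := by
  intro l
  induction l with
  | nil => intro c t h; simp [List.dropWhile] at h
  | cons a l ih =>
    intro c t h
    by_cases hp : p a = true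
    · rw [List.dropWhile_cons_of_pos hp] at h; exact ih c t h
    · rw [List.dropWhile_cons_of_neg hp] at h
      cases h; simpa using hp

-- single-char String.ofList facts
lemma mk_cons (c : Char) (t : List Char) : c.toString ++ String.ofList t = String.ofList (c :: t) := by
  apply String.ext
  simp [Char.toString]

-- main run-level invariant: A's char fold equals B's run fold
lemma main_inv : ∀ (n : ℕ) (cs : List Char), cs.length ≤ n →
    ∀ (x : List String) (first p : Bool), x ≠ [] →
    (∀ c cs', cs = c :: cs' → p = (if isinsP c then first else true)) →
    (List.foldl aStep (x, p) cs).1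
      = ((splitRuns cs).foldl bStep (x, first)).1 := by
  intro n
  induction n with
  | zero =>
    intro cs hlen x first p _ _
    have : cs = [] := List.eq_nil_of_length_eq_zero (Nat.le_zero.mp hlen)
    subst this; simp [splitRuns]
  | succ n ih =>
    intro cs hlen x first p hne hp
    match cs with
    | [] => simp [splitRuns]
    | c :: cs' =>
      set P : Char → Bool := fun d => isinsP d == isinsP c with hP
      have hsplit : cs'.takeWhile P ++ cs'.dropWhile P = cs' := List.takeWhile_append_dropWhile
      have hlen' : (cs'.dropWhile P).length ≤ n := by
        have h1 := List.length_dropWhile_le P cs'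
        have : cs'.length ≤ n := by simpa using Nat.succ_le_succ_iff.mp hlen
        omega
      have htake : ∀ d ∈ cs'.takeWhile P, isinsP d = isinsP c := by
        intro d hd
        have := List.mem_takeWhile_imp hd
        simpa [hP] using this
      have hdrop : ∀ e es, cs'.dropWhile P = e :: es → isinsP e = !(isinsP c) := by
        intro e es h
        have h2 := dropWhile_head_false cs' e es h
        rw [hP] at h2
        revert h2
        cases hc2 : isinsP c <;> cases he : isinsP e <;> simp [he]
      have hrw : splitRuns (c :: cs') = (c :: cs'.takeWhile P) :: splitRuns (cs'.dropWhile P) := by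
        rw [splitRuns]
      have hfold : List.foldl aStep (x, p) (c :: cs')
            = List.foldl aStep (List.foldl aStep (x, p) (c :: cs'.takeWhile P)) (cs'.dropWhile P) := by
        conv_lhs => rw [← hsplit]
        rw [← List.foldl_append, ← List.cons_append, List.foldl_append]
      have hxd : x.dropLast ++ [x.getLastD ""] = x := by
        cases hx : x.getLast? with
        | none => exact absurd (List.getLast?_eq_none_iff.mp hx) hne
        | some a =>
          rw [List.getLastD_eq_getLast?, hx]
          simpa using List.dropLast_append_getLast? a hx
      by_cases hc : isinsP c = true
      · -- insert run
        have hpv : p = first := by simpa [hc] using hp c cs' rfl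
        have hrun : ∀ d ∈ c :: cs'.takeWhile P, isinsP d = true := by
          intro d hd
          rcases List.mem_cons.mp hd with h | h
          · subst h; exact hc
          · rw [htake d h]; exact hc
        have hdrop' : ∀ e es', cs'.dropWhile P = e :: es' →
            true = (if isinsP e then false else true) := by
          intro e es' h
          have := hdrop e es' h
          simp [hc] at this
          simp [this]
        cases first with
        | true =>
          -- A merges the whole run into the last slot; so does B (first group)
          have hA : List.foldl aStep (x, p) (c :: cs'.takeWhile P)
              = (x.dropLast ++ [x.getLastD "" ++ String.ofList (c :: cs'.takeWhile P)], true) := by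
            rw [hpv]
            conv_lhs => rw [← hxd]
            exact foldA_lower _ x.dropLast (x.getLastD "") hrun
          have hB : bStep (x, true) (c :: cs'.takeWhile P)
              = (x.dropLast ++ [x.getLastD "" ++ String.ofList (c :: cs'.takeWhile P)], false) := by
            simp [bStep, hc]
          rw [hfold, hA, hrw, List.foldl_cons, hB]
          exact ih (cs'.dropWhile P) hlen' _ false true (by simp) hdrop'
        | false =>
          -- not the first group: the run becomes a fresh slot
          have hstep : aStep (x, p) c = (x ++ [c.toString], true) := by
            rw [hpv]; simp [aStep, hc]
          have hA : List.foldl aStep (x, p) (c :: cs'.takeWhile P)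
              = (x ++ [String.ofList (c :: cs'.takeWhile P)], true) := by
            rw [List.foldl_cons, hstep,
              foldA_lower _ x c.toString (fun d hd => by rw [htake d hd]; exact hc)]
            rw [mk_cons]
          have hB : bStep (x, false) (c :: cs'.takeWhile P)
              = (x ++ [String.ofList (c :: cs'.takeWhile P)], false) := by
            simp [bStep, hc]
          rw [hfold, hA, hrw, List.foldl_cons, hB]
          exact ih (cs'.dropWhile P) hlen' _ false true (by simp) hdrop'
      · -- match run
        have hc' : isinsP c = false := by simpa using hc
        have hpv : p = true := by simpa [hc'] using hp c cs' rfl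
        have hrun : ∀ d ∈ cs'.takeWhile P, isinsP d = false := by
          intro d hd; rw [htake d hd]; exact hc'
        have hstep : aStep (x, p) c = (x ++ [c.toString], false) := by
          rw [hpv]; simp [aStep, hc']
        have hA : List.foldl aStep (x, p) (c :: cs'.takeWhile P)
            = (x ++ [c.toString] ++ (cs'.takeWhile P).flatMap (fun m => ["", m.toString]), false) := by
          rw [List.foldl_cons, hstep, foldA_upper _ _ hrun]
        have hB : bStep (x, first) (c :: cs'.takeWhile P)
            = (x ++ [c.toString] ++ (cs'.takeWhile P).flatMap (fun m => ["", m.toString]), false) := by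
          simp only [bStep, List.headD_cons]
          rw [if_neg (by simp [hc'])]
          rw [foldB_inner]
        have hdrop' : ∀ e es', cs'.dropWhile P = e :: es' →
            false = (if isinsP e then false else true) := by
          intro e es' h
          have := hdrop e es' h
          simp [this, hc']
        rw [hfold, hA, hrw, List.foldl_cons, hB]
        exact ih (cs'.dropWhile P) hlen' _ false false (by simp) hdrop'

theorem aln2array_spec : Claim_equal_aln2array := by
  intro inseq _ _
  unfold Spec_aln2array aln2array aln2array_alt
  have h := main_inv inseq.toList.length inseq.toList le_rfl [""] true true (by simp)
    (fun c cs' _ => by by_cases h : isinsP c <;> simp [h])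
  simp only [← h]
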